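-- pv_equiv track=rewrite | github.com/Azure/azure-sdk-for-python | scripts/release_helper/utils.py | get_origin_link_and_tag
-- ===== SOURCE A (Python) =====
-- from typing import List, Any
--
-- def get_origin_link_and_tag(issue_body_list: List[str]) -> (str, str):
--     link, readme_tag = '', ''
--     for row in issue_body_list:
--         if 'link' in row.lower() and 'release request' not in row.lower() and link == '':
--             link = row.split(":", 1)[-1].strip()
--         if 'readme tag' in row.lower() and readme_tag == '':
--             readme_tag = row.split(":", 1)[-1].strip()
--         if link and readme_tag:
--             break
--
--     if link.count('https') > 1:
--         link = link.split(']')[0]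
--         link = link.replace('[', "").replace(']', "").replace('(', "").replace(')', "")
--     return link, readme_tag
-- ===== SOURCE B (Python) =====
-- def _payload(row):
--     return row.split(':', 1)[-1].strip()
--
--
-- def _fix_link(link):
--     if link.count('https') > 1:
--         link = link.split(']')[0]
--         link = link.replace('[', '').replace(']', '').replace('(', '').replace(')', '')
--     return link
--
--
-- def get_origin_link_and_tag(issue_body_list):
--     link = next(filter(None, (_payload(r) for r in issue_body_list
--                               if 'link' in r.lower() and 'release request' not in r.lower())), '')
--     readme_tag = next(filter(None, (_payload(r) for r in issue_body_list
--                                     if 'readme tag' in r.lower())), '')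
--     return _fix_link(link), readme_tag
-- ===== Notes on version B (the rewrite author's own statement) =====
-- stated objective: simpler
-- what changed: Replaces A's single stateful loop (two guarded accumulators and an early break) with two independent first-nonempty-payload searches over the list, plus the same shared post-processing of the link.
import Mathlib
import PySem

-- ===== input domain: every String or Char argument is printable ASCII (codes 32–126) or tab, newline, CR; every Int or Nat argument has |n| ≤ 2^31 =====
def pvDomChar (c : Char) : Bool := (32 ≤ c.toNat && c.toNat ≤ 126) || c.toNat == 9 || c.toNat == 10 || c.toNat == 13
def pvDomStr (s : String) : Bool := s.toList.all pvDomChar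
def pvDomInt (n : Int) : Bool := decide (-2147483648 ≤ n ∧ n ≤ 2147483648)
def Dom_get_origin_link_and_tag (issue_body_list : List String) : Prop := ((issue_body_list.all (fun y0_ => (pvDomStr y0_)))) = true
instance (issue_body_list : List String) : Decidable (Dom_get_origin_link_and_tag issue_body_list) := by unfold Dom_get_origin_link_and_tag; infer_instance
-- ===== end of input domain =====

-- B replaces A's single stateful loop (two guarded slots + early break) with two independent
-- first-nonempty-payload searches; objective: simpler decomposition, same cost.

-- shared helpers: the row tests, the payload expression row.split(":",1)[-1].strip(),
-- and the final https bracket-stripping, identical text in both Pythons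
def pvLinkCond (row : String) : Bool :=
  PySem.Str.isIn "link" (PySem.Str.lower row) && !(PySem.Str.isIn "release request" (PySem.Str.lower row))

def pvTagCond (row : String) : Bool :=
  PySem.Str.isIn "readme tag" (PySem.Str.lower row)

def pvPayload (row : String) : String :=
  PySem.Str.strip ((PySem.List.pyGet? ((PySem.Str.splitMax? row ":" 1).getD []) (-1)).getD "")

def pvFixLink (link : String) : String :=
  if PySem.Str.count link "https" > 1 then
    let l := (PySem.List.pyGet? ((PySem.Str.split? link "]").getD []) 0).getD ""
    PySem.Str.replace (PySem.Str.replace (PySem.Str.replace (PySem.Str.replace l "[" "") "]" "") "(" "") ")" ""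
  else link

-- ===== PORT A =====
-- A's for-loop: two accumulators, each written only while still '', break when both nonempty
def pvGoA : List String → String → String → String × String
  | [], link, tag => (link, tag)
  | row :: rest, link, tag =>
    let link' := if pvLinkCond row && link == "" then pvPayload row else link
    let tag' := if pvTagCond row && tag == "" then pvPayload row else tag
    if link' != "" && tag' != "" then (link', tag') else pvGoA rest link' tag'

def get_origin_link_and_tag (issue_body_list : List String) : String × String :=
  let p := pvGoA issue_body_list "" ""
  (pvFixLink p.1, p.2)

-- ===== PORT B =====
-- next(filter(None, (payload(r) for r in lst if pred r)), '')
def pvFirstPayload (pred : String → Bool) (lst : List String) : String :=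
  (((lst.filter pred).map pvPayload).find? (fun p => p != "")).getD ""

def get_origin_link_and_tag_alt (issue_body_list : List String) : String × String :=
  let link := pvFirstPayload pvLinkCond issue_body_list
  let tag := pvFirstPayload pvTagCond issue_body_list
  (pvFixLink link, tag)

-- ===== PRECONDITION & SPEC =====
def Spec_get_origin_link_and_tag (issue_body_list : List String) (out : String × String) : Prop := out = get_origin_link_and_tag_alt issue_body_list
instance (issue_body_list : List String) (out : String × String) : Decidable (Spec_get_origin_link_and_tag issue_body_list out) := by unfold Spec_get_origin_link_and_tag; infer_instance

-- ===== CLAIM (what is proved, stated in full; the proofs are below) =====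
def Claim_equal_get_origin_link_and_tag : Prop := ∀ (issue_body_list : List String), Dom_get_origin_link_and_tag issue_body_list → Spec_get_origin_link_and_tag issue_body_list (get_origin_link_and_tag issue_body_list)

-- ===== LEMMAS AND PROOFS =====

theorem pvFirstPayload_nil (pred : String → Bool) : pvFirstPayload pred [] = "" := rfl

theorem pvFirstPayload_cons (pred : String → Bool) (r : String) (rest : List String) :
    pvFirstPayload pred (r :: rest) =
      if pred r then (if pvPayload r ≠ "" then pvPayload r else pvFirstPayload pred rest)
      else pvFirstPayload pred rest := by
  simp only [pvFirstPayload, List.filter]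
  by_cases h : pred r
  · by_cases h2 : pvPayload r = "" <;> simp [h, h2, bne]
  · simp [h]

theorem pvGoA_eq (lst : List String) : ∀ (link tag : String),
    pvGoA lst link tag =
      ((if link = "" then pvFirstPayload pvLinkCond lst else link),
       (if tag = "" then pvFirstPayload pvTagCond lst else tag)) := by
  induction lst with
  | nil =>
    intro link tag
    by_cases hl : link = "" <;> by_cases ht : tag = "" <;> simp [pvGoA, pvFirstPayload_nil, hl, ht]
  | cons row rest ih =>
    intro link tag
    simp only [pvGoA, pvFirstPayload_cons, ih]
    by_cases hl : link = "" <;> by_cases ht : tag = "" <;>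
      by_cases hc1 : pvLinkCond row <;> by_cases hc2 : pvTagCond row <;>
        by_cases hp : pvPayload row = "" <;>
          simp_all

theorem get_origin_link_and_tag_spec : Claim_equal_get_origin_link_and_tag := by
  intro lst _
  show _ = _
  simp [get_origin_link_and_tag, get_origin_link_and_tag_alt, pvGoA_eq]
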